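-- pv_equiv track=rewrite | github.com/owais-ch/Arrays | Greater than All.py | solve
-- ===== SOURCE A (Python) =====
-- def solve(A):
--     maximum=A[0]
--
--     count=0
--
--     for i in range(1,len(A)):
--         if A[i]>maximum:
--             count+=1
--             maximum=A[i]
--
--     return count+1
-- ===== SOURCE B (Python) =====
-- def solve(A):
--     # table-build then count: prefix-maxima table, then count adjacent strict increases
--     m = A[0]
--     pm = []
--     for x in A:
--         if x > m:
--             m = x
--         pm.append(m)
--     return 1 + sum(1 for prev, cur in zip(pm, pm[1:]) if cur > prev)
-- ===== Notes on version B (the rewrite author's own statement) =====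
-- stated objective: alternative
-- what changed: B builds the full prefix-maxima table in one pass and then counts adjacent strict increases in a second pass (returning that plus 1), instead of A's single running-max loop with an in-loop counter.
import Mathlib
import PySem

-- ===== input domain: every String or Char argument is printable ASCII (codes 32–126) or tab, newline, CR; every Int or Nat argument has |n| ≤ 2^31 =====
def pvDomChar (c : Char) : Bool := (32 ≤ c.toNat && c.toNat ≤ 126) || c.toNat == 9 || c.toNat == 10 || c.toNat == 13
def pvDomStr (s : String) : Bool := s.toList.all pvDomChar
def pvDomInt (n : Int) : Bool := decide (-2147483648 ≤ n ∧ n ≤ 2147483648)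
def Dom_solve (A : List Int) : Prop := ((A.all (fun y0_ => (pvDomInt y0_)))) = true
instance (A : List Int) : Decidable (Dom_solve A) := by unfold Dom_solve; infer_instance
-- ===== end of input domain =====

-- B builds a prefix-maxima table then counts adjacent strict increases; same result as A's running-max loop.

-- ===== PORT A =====
def solve (A : List Int) : Int :=
  match PySem.List.pyGet? A 0 with
  | none => 0  -- unreachable under Pre_solve (A[0] raises IndexError on [])
  | some m0 =>
    let st := (PySem.List.pyRange 1 (A.length : Int) 1).foldl
      (fun (p : Int × Int) i =>
        let ai := PySem.List.pyGetD A i 0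
        if ai > p.1 then (ai, p.2 + 1) else p) (m0, 0)
    st.2 + 1

-- ===== PORT B =====
def solve_alt (A : List Int) : Int :=
  match PySem.List.pyGet? A 0 with
  | none => 0  -- unreachable under Pre_solve (A[0] raises IndexError on [])
  | some a0 =>
    let pm := (A.foldl (fun (p : List Int × Int) x =>
        let m := if x > p.2 then x else p.2
        (p.1 ++ [m], m)) (([] : List Int), a0)).1
    1 + (((pm.zip (pm.drop 1)).countP (fun q => decide (q.1 < q.2)) : Nat) : Int)

-- ===== PRECONDITION & SPEC =====
-- Pre_solve excludes only the empty list, on which both A and B raise IndexError at A[0].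
def Pre_solve (A : List Int) : Prop := A ≠ []
instance (A : List Int) : Decidable (Pre_solve A) := by unfold Pre_solve; infer_instance
def pvWitness_solve : List Int := ([3, 1, 4])

def Spec_solve (A : List Int) (out : Int) : Prop := out = solve_alt A
instance (A : List Int) (out : Int) : Decidable (Spec_solve A out) := by unfold Spec_solve; infer_instance

-- ===== CLAIM (what is proved, stated in full; the proofs are below) =====
def Claim_equal_solve : Prop := ∀ (A : List Int), Dom_solve A → Pre_solve A → Spec_solve A (solve A)

-- ===== LEMMAS AND PROOFS =====

/-- running-maximum scan: the prefix-maxima values contributed by `t` starting from max `m`. -/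
def scanM (m : Int) : List Int → List Int
  | [] => []
  | x :: t => (if x > m then x else m) :: scanM (if x > m then x else m) t

/-- number of strict improvements of the running max over `t` starting from `m`. -/
def gCount (m : Int) : List Int → Int
  | [] => 0
  | x :: t => (if x > m then 1 else 0) + gCount (if x > m then x else m) t

lemma foldA_eq (t : List Int) (m c : Int) :
    (t.foldl (fun (p : Int × Int) ai => if ai > p.1 then (ai, p.2 + 1) else p) (m, c)).2
      = c + gCount m t := by
  induction t generalizing m c with
  | nil => simp [gCount]
  | cons x t ih =>
    by_cases h : x > m
    · simp [List.foldl, h, gCount, ih]; ring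
    · simp [List.foldl, h, gCount, ih]

lemma foldB_eq (t : List Int) (m : Int) (acc : List Int) :
    (t.foldl (fun (p : List Int × Int) x =>
        (p.1 ++ [if x > p.2 then x else p.2], if x > p.2 then x else p.2)) (acc, m)).1
      = acc ++ scanM m t := by
  induction t generalizing m acc with
  | nil => simp [scanM]
  | cons x t ih =>
    simp only [List.foldl, scanM, ih]
    simp

/-- adjacent strict increases of the prefix-maxima list equal the improvement count. -/
lemma adj_eq (t : List Int) (m : Int) :
    ((((m :: scanM m t).zip ((m :: scanM m t).drop 1)).countP
        (fun q => decide (q.1 < q.2)) : Nat) : Int) = gCount m t := by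
  induction t generalizing m with
  | nil => simp [scanM, gCount]
  | cons x t ih =>
    by_cases h : x > m
    · have hm : decide (m < x) = true := by simp [gt_iff_lt] at h; simp [h]
      simp only [scanM, if_pos h, gCount, List.drop, List.zip_cons_cons, List.countP_cons, hm]
      push_cast
      rw [← ih x]
      simp
      ring
    · have hm : decide (m < m) = false := by simp
      simp only [scanM, if_neg h, gCount, List.drop, List.zip_cons_cons, List.countP_cons, hm]
      push_cast
      rw [← ih m]
      simp

-- ===== VERDICT (by name: the statement is the Claim_ definition above) =====
theorem solve_spec : Claim_equal_solve := by
  intro A _ hpre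
  cases A with
  | nil => exact absurd rfl hpre
  | cons a t =>
    show solve (a :: t) = solve_alt (a :: t)
    unfold solve solve_alt
    have hget : PySem.List.pyGet? (a :: t) 0 = some a := by
      simp [PySem.List.pyGet?, PySem.List.pyIdx?]
    rw [hget]
    simp only []
    -- A side: index fold over range(1, len) = fold over t
    have hA : (PySem.List.pyRange 1 ((a :: t).length : Int) 1).foldl
        (fun (p : Int × Int) i =>
          let ai := PySem.List.pyGetD (a :: t) i 0
          if ai > p.1 then (ai, p.2 + 1) else p) (a, 0)
        = t.foldl (fun (p : Int × Int) ai => if ai > p.1 then (ai, p.2 + 1) else p) (a, 0) := by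
      have := PySem.List.foldl_pyRange_pyGetD' (xs := a :: t) (a := 1) (d := 0)
        (f := fun (p : Int × Int) ai => if ai > p.1 then (ai, p.2 + 1) else p)
        (init := (a, 0)) (by norm_num)
      simpa using this
    rw [hA, foldA_eq]
    -- B side: the fold builds the prefix-maxima table
    have hB : ((a :: t).foldl (fun (p : List Int × Int) x =>
          let m := if x > p.2 then x else p.2
          (p.1 ++ [m], m)) (([] : List Int), a)).1 = a :: scanM a t := by
      have h0 : ¬ (a > a) := lt_irrefl a
      simp only [List.foldl, if_neg h0]
      simpa using foldB_eq t a [a]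
    simp only [hB]
    rw [adj_eq]
    ring
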